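-- pv_equiv track=rewrite | github.com/Bandangok/Tests | main.py | get_shelf
-- ===== SOURCE A (Python) =====
-- directories = {
--     '1': ['2207 876234', '11-2'],
--     '2': ['10006'],
--     '3': []
-- }
--
-- def get_shelf(number: str):
--     flag = False
--     for shelf, id in directories.items():
--         if number in id:
--             flag = shelf
--             return 'Документ', number, 'лежит на полке номер ', flag
--     if flag == False:
--         return f'Документ с номером ', number, ' не найден'
--     return
-- ===== SOURCE B (Python) =====
-- directories = {
--     '1': ['2207 876234', '11-2'],
--     '2': ['10006'],
--     '3': []
-- }
--
-- # Reverse index built once at module load: document number -> shelf (first shelf wins).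
-- number_to_shelf = {}
-- for _shelf, _ids in directories.items():
--     for _i in _ids:
--         number_to_shelf.setdefault(_i, _shelf)
--
-- def get_shelf(number: str):
--     if number in number_to_shelf:
--         return 'Документ', number, 'лежит на полке номер ', number_to_shelf[number]
--     return f'Документ с номером ', number, ' не найден'
-- ===== Notes on version B (the rewrite author's own statement) =====
-- stated objective: idiomatic
-- what changed: Builds a reverse index (document number -> shelf, first shelf wins) once at module load and replaces A's per-call scan over all shelves with a single dict lookup.
import Mathlib
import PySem

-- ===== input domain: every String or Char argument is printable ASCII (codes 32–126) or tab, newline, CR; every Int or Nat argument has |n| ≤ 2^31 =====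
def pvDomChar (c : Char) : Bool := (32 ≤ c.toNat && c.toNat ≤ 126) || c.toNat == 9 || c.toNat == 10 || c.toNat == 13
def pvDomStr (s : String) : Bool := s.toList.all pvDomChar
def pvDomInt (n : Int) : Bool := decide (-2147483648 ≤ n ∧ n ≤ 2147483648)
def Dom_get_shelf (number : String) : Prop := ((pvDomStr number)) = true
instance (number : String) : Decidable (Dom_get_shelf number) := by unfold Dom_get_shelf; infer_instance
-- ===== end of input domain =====

-- B replaces A's per-call scan over all shelves with a one-time reverse index and a single lookup.

-- ===== PORT A =====
def directories : PySem.Dict String (List String) :=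
  ⟨[("1", ["2207 876234", "11-2"]), ("2", ["10006"]), ("3", [])]⟩

-- the for-loop over directories.items(); reaching the end = flag still False, the final return
def getShelfLoop (number : String) : List (String × List String) → List String
  | [] => ["Документ с номером ", number, " не найден"]
  | (shelf, id) :: rest =>
      if number ∈ id then ["Документ", number, "лежит на полке номер ", shelf]
      else getShelfLoop number rest

def get_shelf (number : String) : List String :=
  getShelfLoop number (PySem.Dict.items directories)

-- ===== PORT B =====
-- reverse index built once: for each id of each shelf, setdefault(id, shelf)
def number_to_shelf : PySem.Dict String String :=
  (PySem.Dict.items directories).foldl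
    (fun d p => p.2.foldl
      (fun d i => if (PySem.Dict.get? d i).isSome then d else PySem.Dict.insert d i p.1) d)
    ⟨[]⟩

def get_shelf_alt (number : String) : List String :=
  match PySem.Dict.get? number_to_shelf number with
  | some shelf => ["Документ", number, "лежит на полке номер ", shelf]
  | none => ["Документ с номером ", number, " не найден"]

-- ===== PRECONDITION & SPEC =====
def Spec_get_shelf (number : String) (out : List String) : Prop := out = get_shelf_alt number
instance (number : String) (out : List String) : Decidable (Spec_get_shelf number out) := by unfold Spec_get_shelf; infer_instance

-- ===== CLAIM (what is proved, stated in full; the proofs are below) =====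
def Claim_equal_get_shelf : Prop := ∀ (number : String), Dom_get_shelf number → Spec_get_shelf number (get_shelf number)

-- ===== LEMMAS AND PROOFS =====

-- ===== VERDICT (by name: the statement is the Claim_ definition above) =====
theorem get_shelf_spec : Claim_equal_get_shelf := by
  intro number _
  unfold Spec_get_shelf get_shelf get_shelf_alt
  by_cases h1 : number = "2207 876234"
  · subst h1; decide
  by_cases h2 : number = "11-2"
  · subst h2; decide
  by_cases h3 : number = "10006"
  · subst h3; decide
  have e1 : ("2207 876234" == number) = false := by simp [beq_eq_false_iff_ne]; exact fun h => h1 h.symm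
  have e2 : ("11-2" == number) = false := by simp [beq_eq_false_iff_ne]; exact fun h => h2 h.symm
  have e3 : ("10006" == number) = false := by simp [beq_eq_false_iff_ne]; exact fun h => h3 h.symm
  simp [getShelfLoop, number_to_shelf, directories, PySem.Dict.get?,
    PySem.Dict.insert, List.find?, h1, h2, h3, e1, e2, e3]
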